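-- pv_equiv track=rewrite | github.com/FerdmanAriel/computer_science | hw2_209224120.py | lychrel_sort
-- ===== SOURCE A (Python) =====
-- def lychrel_sort(numbers, t):
--
--     is_lychrel_suspect_dict = {}
--     is_not_lychrel_suspect_dict = {}
--
--     for number in numbers:
--         is_suspect = True
--         count = 0
--         n = number
--         while is_suspect and count < t:
--             n_reverse = int(str(n)[ : :-1])
--             n = n + n_reverse
--             is_suspect = str(n) != str(n)[ : :-1]
--             count += 1
--
--         if is_suspect :
--             is_lychrel_suspect_dict[number] = count
--         else:
--             is_not_lychrel_suspect_dict[number] = count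
--
--     is_lychrel_suspect_dict_sorted = dict(sorted(is_lychrel_suspect_dict.items(), key=lambda item: item[1]))
--     is_not_lychrel_suspect_dict_sorted = dict(sorted(is_not_lychrel_suspect_dict.items(), key=lambda item: item[1]))
--
--     is_lychrel_suspect_dict_sorted_keys = list(is_lychrel_suspect_dict_sorted)
--     is_not_lychrel_suspect_dict_sorted_keys = list(is_not_lychrel_suspect_dict_sorted)
--
--     return is_not_lychrel_suspect_dict_sorted_keys + is_lychrel_suspect_dict_sorted_keys
-- ===== SOURCE B (Python) =====
-- def lychrel_sort(numbers, t):
--     # No comparison sort: suspects all use exactly t steps, so they stay in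
--     # first-occurrence order; non-suspects are counting-sorted by step count.
--     suspects = []
--     steps = {}
--     seen = set()
--     for number in numbers:
--         if number in seen:
--             continue
--         seen.add(number)
--         n, c = number, 0
--         while c < t:
--             n += int(str(n)[::-1])
--             c += 1
--             if str(n) == str(n)[::-1]:
--                 steps[number] = c
--                 break
--         else:
--             suspects.append(number)
--     buckets = {}
--     for num, c in steps.items():
--         buckets.setdefault(c, []).append(num)
--     out = []
--     if steps:
--         top = max(buckets)
--         for c in range(1, top + 1):
--             out += buckets.get(c, [])
--     return out + suspects
-- ===== Notes on version B (the rewrite author's own statement) =====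
-- stated objective: alternative
-- what changed: A partitions into two dicts and comparison-sorts each by step count; B does no comparison sort at all: it memoizes the reverse-add loop per distinct number, keeps Lychrel suspects in first-occurrence order (they provably all take exactly t steps, so A's stable sort is the identity on them), and emits non-suspects by a counting sort over step-count buckets.
import Mathlib
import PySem

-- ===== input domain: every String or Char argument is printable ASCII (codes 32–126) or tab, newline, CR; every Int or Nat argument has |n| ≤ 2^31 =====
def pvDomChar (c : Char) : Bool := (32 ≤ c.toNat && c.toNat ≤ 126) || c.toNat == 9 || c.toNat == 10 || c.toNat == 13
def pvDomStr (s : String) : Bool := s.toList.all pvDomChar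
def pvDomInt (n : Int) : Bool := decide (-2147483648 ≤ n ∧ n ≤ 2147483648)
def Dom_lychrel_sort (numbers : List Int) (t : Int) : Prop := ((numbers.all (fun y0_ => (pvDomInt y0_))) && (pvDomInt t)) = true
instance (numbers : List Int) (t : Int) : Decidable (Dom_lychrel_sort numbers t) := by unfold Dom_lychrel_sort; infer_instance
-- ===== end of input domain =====

-- B removes A's comparison sorts: suspects keep first-occurrence order (they all take
-- exactly t steps, so A's stable sort is the identity on them) and non-suspects are
-- counting-sorted into step-count buckets; the reverse-add loop runs once per distinct number.

-- ===== PORT A =====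
-- A's inner `while is_suspect and count < t` loop; int(str(n)[::-1]) is
-- PySem.Int.ofStr? of the reversed decimal string (`.getD 0` is unreachable inside Pre_:
-- there it never returns none, since n stays nonnegative whenever the loop body runs).
def lychrelLoopA (t : Int) (is_suspect : Bool) (count : Int) (n : Int) : Bool × Int :=
  if is_suspect ∧ count < t then
    let n_reverse := (PySem.Int.ofStr? (String.mk (PySem.Int.toStr n).toList.reverse)).getD 0
    let n' := n + n_reverse
    let s := (PySem.Int.toStr n').toList
    lychrelLoopA t (decide (s ≠ s.reverse)) (count + 1) n'
  else (is_suspect, count)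
termination_by (t - count).toNat
decreasing_by omega

def lychrel_sort (numbers : List Int) (t : Int) : List Int :=
  let dicts := numbers.foldl
    (fun (acc : PySem.Dict Int Int × PySem.Dict Int Int) number =>
      let r := lychrelLoopA t true 0 number
      if r.1 then (acc.1.insert number r.2, acc.2)
      else (acc.1, acc.2.insert number r.2))
    (PySem.Dict.empty, PySem.Dict.empty)
  let is_lychrel_suspect_dict_sorted :=
    PySem.Dict.ofList (PySem.List.sorted dicts.1.items (fun item => item.2))
  let is_not_lychrel_suspect_dict_sorted :=
    PySem.Dict.ofList (PySem.List.sorted dicts.2.items (fun item => item.2))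
  is_not_lychrel_suspect_dict_sorted.keys ++ is_lychrel_suspect_dict_sorted.keys

-- ===== PORT B =====
-- Source B's inner `while c < t: … break / else:` loop: some c = palindrome reached after c
-- steps (break), none = t steps exhausted without a palindrome (the while's else branch).
def stepsB (t c n : Int) : Option Int :=
  if c < t then
    let n' := n + (PySem.Int.ofStr? (String.mk (PySem.Int.toStr n).toList.reverse)).getD 0
    let c' := c + 1
    let s := (PySem.Int.toStr n').toList
    if s = s.reverse then some c' else stepsB t c' n'
  else none
termination_by (t - c).toNat
decreasing_by omega

def lychrel_sort_alt (numbers : List Int) (t : Int) : List Int :=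
  -- main loop: state = (suspects, steps, seen) as in Source B
  let st := numbers.foldl
    (fun (acc : List Int × PySem.Dict Int Int × PySem.Set Int) number =>
      if acc.2.2.contains number then acc
      else
        let seen := acc.2.2.add number
        match stepsB t 0 number with
        | some c => (acc.1, acc.2.1.insert number c, seen)
        | none => (acc.1 ++ [number], acc.2.1, seen))
    ([], PySem.Dict.empty, PySem.Set.ofList [])
  let suspects := st.1
  let steps := st.2.1
  -- buckets: step count -> numbers with that count, in insertion order
  let buckets := steps.items.foldl
    (fun (b : PySem.Dict Int (List Int)) kv => b.modify kv.2 [] (· ++ [kv.1]))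
    PySem.Dict.empty
  let out : List Int :=
    if steps.items.isEmpty then []
    else
      let top := (PySem.List.max? buckets.keys (fun c => c)).getD 0
      (PySem.List.pyRange 1 (top + 1) 1).foldl (fun acc c => acc ++ buckets.getD c []) []
  out ++ suspects

-- ===== PRECONDITION & SPEC =====
-- Pre_ excludes exactly the inputs where A raises: with t > 0 and a negative number in the
-- list, int(str(n)[::-1]) gets a string ending in '-' and raises ValueError.
def Pre_lychrel_sort (numbers : List Int) (t : Int) : Prop :=
  0 < t → ∀ n ∈ numbers, 0 ≤ n
instance (numbers : List Int) (t : Int) : Decidable (Pre_lychrel_sort numbers t) := by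
  unfold Pre_lychrel_sort; infer_instance
def pvWitness_lychrel_sort : List Int × Int := ([196, 56, 0, 11, 56], 3)

def Spec_lychrel_sort (numbers : List Int) (t : Int) (out : List Int) : Prop := out = lychrel_sort_alt numbers t
instance (numbers : List Int) (t : Int) (out : List Int) : Decidable (Spec_lychrel_sort numbers t out) := by unfold Spec_lychrel_sort; infer_instance

-- ===== CLAIM (what is proved, stated in full; the proofs are below) =====
def Claim_equal_lychrel_sort : Prop := ∀ (numbers : List Int) (t : Int), Dom_lychrel_sort numbers t → Pre_lychrel_sort numbers t → Spec_lychrel_sort numbers t (lychrel_sort numbers t)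

-- ===== LEMMAS AND PROOFS =====

-- A's loop and B's loop compute the same information.
theorem loops_agree (t : Int) (c n : Int) :
    lychrelLoopA t true c n =
      match stepsB t c n with
      | some c' => (false, c')
      | none => (true, max t c) := by
  generalize hk : (t - c).toNat = k
  induction k generalizing c n with
  | zero =>
      have h : ¬ c < t := by omega
      rw [lychrelLoopA, stepsB]
      simp [h]
      omega
  | succ k ih =>
      by_cases h : c < t
      · rw [lychrelLoopA, stepsB]
        simp only [h, and_true, if_pos]
        set n' := n + (PySem.Int.ofStr? (String.mk (PySem.Int.toStr n).toList.reverse)).getD 0 with hn'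
        set s := (PySem.Int.toStr n').toList with hs
        by_cases hp : s = s.reverse
        · rw [if_pos hp, decide_eq_false (show ¬(s ≠ s.reverse) from fun hne => hne hp)]
          rw [lychrelLoopA]; simp
        · rw [if_neg hp, decide_eq_true (show s ≠ s.reverse from hp)]
          rw [ih (c+1) n' (by omega)]
          have : max t (c+1) = max t c := by omega
          rw [this]
      · rw [lychrelLoopA, stepsB]
        simp [h]
        omega

-- B's loop counts at least one step when it finds a palindrome.
theorem stepsB_pos (t : Int) : ∀ (c n c' : Int), stepsB t c n = some c' → c < c' := by
  intro c n
  generalize hk : (t - c).toNat = k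
  induction k generalizing c n with
  | zero =>
      intro c' h
      have hlt : ¬ c < t := by omega
      rw [stepsB, if_neg hlt] at h
      exact absurd h (by simp)
  | succ k ih =>
      intro c' h
      by_cases hc : c < t
      · set n' := n + (PySem.Int.ofStr? (String.mk (PySem.Int.toStr n).toList.reverse)).getD 0 with hn'
        have he : stepsB t c n =
            if (PySem.Int.toStr n').toList = (PySem.Int.toStr n').toList.reverse
            then some (c + 1) else stepsB t (c + 1) n' := by
          rw [stepsB, if_pos hc]
        rw [he] at h
        by_cases hp : (PySem.Int.toStr n').toList = (PySem.Int.toStr n').toList.reverse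
        · rw [if_pos hp] at h
          have : c + 1 = c' := by simpa using h
          omega
        · rw [if_neg hp] at h
          have := ih (c+1) n' (by omega) c' h
          omega
      · rw [stepsB, if_neg hc] at h
        exact absurd h (by simp)

-- Per-number result of A's loop (the canonical step function of the proofs).
def pvF (t m : Int) : Bool × Int := lychrelLoopA t true 0 m

theorem pvF_true_snd (t m : Int) (h : (pvF t m).1 = true) : (pvF t m).2 = max t 0 := by
  have he : pvF t m = match stepsB t 0 m with
      | some c' => (false, c')
      | none => (true, max t 0) := loops_agree t 0 m
  cases hs : stepsB t 0 m with
  | none => rw [he, hs]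
  | some c => rw [he, hs] at h; simp at h

theorem pvF_false_pos (t m : Int) (h : (pvF t m).1 = false) : 1 ≤ (pvF t m).2 := by
  have he : pvF t m = match stepsB t 0 m with
      | some c' => (false, c')
      | none => (true, max t 0) := loops_agree t 0 m
  cases hs : stepsB t 0 m with
  | none => rw [he, hs] at h; simp at h
  | some c =>
      rw [he, hs]
      have := stepsB_pos t 0 m c hs
      simpa using this

theorem dedup_snoc (p : List Int) (x : Int) :
    PySem.List.dedup (p ++ [x]) =
      if x ∈ p then PySem.List.dedup p else PySem.List.dedup p ++ [x] := by
  show PySem.Set.ofList (p ++ [x]) = _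
  rw [PySem.Set.ofList, List.foldl_append]
  show PySem.Set.add (PySem.Set.ofList p) x = _
  rw [PySem.Set.add]
  by_cases hx : x ∈ p
  · rw [if_pos (show (PySem.Set.ofList p).contains x = true by
      simp [PySem.Set.contains, PySem.Set.mem_ofList, hx]), if_pos hx]
    rfl
  · rw [if_neg (show ¬ (PySem.Set.ofList p).contains x = true by
      simp [PySem.Set.contains, PySem.Set.mem_ofList, hx]), if_neg hx]
    rfl

-- Canonical contents of one of A's dicts (pr selects which) after processing `p`.
def pvC (t : Int) (pr : Bool → Bool) (p : List Int) : List (Int × Int) :=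
  ((PySem.List.dedup p).filter (fun m => pr (pvF t m).1)).map (fun m => (m, (pvF t m).2))

theorem contains_pvC (t : Int) (pr : Bool → Bool) (p : List Int) (x : Int) :
    (PySem.Dict.mk (pvC t pr p)).contains x = decide (x ∈ p ∧ pr (pvF t x).1 = true) := by
  rw [PySem.Dict.contains_mk]
  by_cases hx : x ∈ p ∧ pr (pvF t x).1 = true
  · simp only [hx]
    refine List.any_eq_true.mpr ⟨(x, (pvF t x).2), ?_, by simp⟩
    exact List.mem_map.mpr ⟨x, List.mem_filter.mpr
      ⟨(PySem.Set.mem_ofList p x).mpr hx.1, hx.2⟩, rfl⟩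
  · simp only [hx, decide_false]
    refine List.any_eq_false.mpr ?_
    intro kv hkv
    rcases List.mem_map.mp hkv with ⟨m, hm, rfl⟩
    rcases List.mem_filter.mp hm with ⟨hmem, hpr⟩
    simp only [beq_iff_eq]
    intro hEq
    exact hx ⟨hEq ▸ (PySem.Set.mem_ofList p m).mp hmem, hEq ▸ hpr⟩

theorem insert_pvC_self (t : Int) (pr : Bool → Bool) (p : List Int) (x : Int)
    (hx : x ∈ p) (hpr : pr (pvF t x).1 = true) :
    (PySem.Dict.mk (pvC t pr p)).insert x (pvF t x).2 = PySem.Dict.mk (pvC t pr p) := by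
  apply PySem.Dict.ext
  rw [PySem.Dict.items_insert_of_contains _ _ (by rw [contains_pvC]; simp [hx, hpr])]
  show (pvC t pr p).map (fun q => if q.1 == x then (x, (pvF t x).2) else q) = pvC t pr p
  have h : ∀ kv ∈ pvC t pr p,
      (fun q => if q.1 == x then (x, (pvF t x).2) else q) kv = id kv := by
    intro kv hkv
    rcases List.mem_map.mp hkv with ⟨m, hm, rfl⟩
    by_cases hmx : m = x
    · subst hmx; simp
    · simp [hmx]
  rw [List.map_congr_left h, List.map_id]

theorem pvC_snoc (t : Int) (pr : Bool → Bool) (p : List Int) (x : Int) :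
    pvC t pr (p ++ [x]) =
      if x ∈ p then pvC t pr p
      else if pr (pvF t x).1 then pvC t pr p ++ [(x, (pvF t x).2)] else pvC t pr p := by
  unfold pvC
  rw [dedup_snoc]
  by_cases hx : x ∈ p
  · rw [if_pos hx, if_pos hx]
  · rw [if_neg hx, if_neg hx, List.filter_append, List.map_append]
    by_cases hpr : pr (pvF t x).1
    · rw [if_pos hpr]; simp [hpr]
    · rw [if_neg hpr]; simp [hpr]

theorem insert_pvC_fresh (t : Int) (pr : Bool → Bool) (p : List Int) (x : Int)
    (hx : ¬ x ∈ p) (hpr : pr (pvF t x).1 = true) :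
    (PySem.Dict.mk (pvC t pr p)).insert x (pvF t x).2 = PySem.Dict.mk (pvC t pr (p ++ [x])) := by
  apply PySem.Dict.ext
  rw [PySem.Dict.items_insert_of_not_contains _ _ (by rw [contains_pvC]; simp [hx])]
  show pvC t pr p ++ [(x, (pvF t x).2)] = pvC t pr (p ++ [x])
  rw [pvC_snoc, if_neg hx, if_pos hpr]

-- ---- A's fold builds (pvC id, pvC not) ----
theorem foldA (t : Int) (l : List Int) : ∀ (p : List Int),
    l.foldl (fun (acc : PySem.Dict Int Int × PySem.Dict Int Int) number =>
        let r := lychrelLoopA t true 0 number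
        if r.1 then (acc.1.insert number r.2, acc.2)
        else (acc.1, acc.2.insert number r.2))
      (PySem.Dict.mk (pvC t (fun b => b) p), PySem.Dict.mk (pvC t (fun b => !b) p))
    = (PySem.Dict.mk (pvC t (fun b => b) (p ++ l)), PySem.Dict.mk (pvC t (fun b => !b) (p ++ l))) := by
  induction l with
  | nil => intro p; simp
  | cons x l ih =>
      intro p
      rw [List.foldl_cons]
      have hstep :
          (let r := lychrelLoopA t true 0 x
           if r.1 then ((PySem.Dict.mk (pvC t (fun b => b) p)).insert x r.2, PySem.Dict.mk (pvC t (fun b => !b) p))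
           else (PySem.Dict.mk (pvC t (fun b => b) p), (PySem.Dict.mk (pvC t (fun b => !b) p)).insert x r.2))
          = (PySem.Dict.mk (pvC t (fun b => b) (p ++ [x])), PySem.Dict.mk (pvC t (fun b => !b) (p ++ [x]))) := by
        show (if (pvF t x).1 then
                ((PySem.Dict.mk (pvC t (fun b => b) p)).insert x (pvF t x).2, PySem.Dict.mk (pvC t (fun b => !b) p))
              else (PySem.Dict.mk (pvC t (fun b => b) p), (PySem.Dict.mk (pvC t (fun b => !b) p)).insert x (pvF t x).2)) = _
        by_cases hf : (pvF t x).1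
        · rw [if_pos hf]
          by_cases hx : x ∈ p
          · rw [insert_pvC_self t _ p x hx hf, pvC_snoc, pvC_snoc, if_pos hx, if_pos hx]
          · rw [insert_pvC_fresh t _ p x hx hf]
            congr 1
            apply congrArg
            rw [pvC_snoc, if_neg hx, if_neg (by simp [hf])]
        · rw [if_neg hf]
          by_cases hx : x ∈ p
          · rw [insert_pvC_self t _ p x hx (by simp [hf]), pvC_snoc, pvC_snoc, if_pos hx, if_pos hx]
          · rw [insert_pvC_fresh t _ p x hx (by simp [hf])]
            congr 1
            rw [pvC_snoc, if_neg hx, if_neg (by simp [hf])]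
      rw [hstep]
      have h2 : p ++ x :: l = (p ++ [x]) ++ l := by simp
      rw [h2]
      exact ih (p ++ [x])

-- Canonical suspects list after processing `p` (first-occurrence order).
def pvS (t : Int) (p : List Int) : List Int :=
  (PySem.List.dedup p).filter (fun m => (pvF t m).1)

theorem pvS_snoc (t : Int) (p : List Int) (x : Int) :
    pvS t (p ++ [x]) =
      if x ∈ p then pvS t p
      else if (pvF t x).1 then pvS t p ++ [x] else pvS t p := by
  unfold pvS
  rw [dedup_snoc]
  by_cases hx : x ∈ p
  · rw [if_pos hx, if_pos hx]
  · rw [if_neg hx, if_neg hx, List.filter_append]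
    by_cases hf : (pvF t x).1
    · rw [if_pos hf]; simp [hf]
    · rw [if_neg hf]; simp [hf]

-- ---- B's fold builds (pvS, pvC not, seen set) ----
theorem foldB (t : Int) (l : List Int) : ∀ (p : List Int),
    l.foldl (fun (acc : List Int × PySem.Dict Int Int × PySem.Set Int) number =>
        if acc.2.2.contains number then acc
        else
          let seen := acc.2.2.add number
          match stepsB t 0 number with
          | some c => (acc.1, acc.2.1.insert number c, seen)
          | none => (acc.1 ++ [number], acc.2.1, seen))
      (pvS t p, PySem.Dict.mk (pvC t (fun b => !b) p), PySem.Set.ofList p)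
    = (pvS t (p ++ l), PySem.Dict.mk (pvC t (fun b => !b) (p ++ l)), PySem.Set.ofList (p ++ l)) := by
  induction l with
  | nil => intro p; simp
  | cons x l ih =>
      intro p
      rw [List.foldl_cons]
      have hset : PySem.Set.ofList (p ++ [x]) = PySem.Set.add (PySem.Set.ofList p) x := by
        rw [PySem.Set.ofList, List.foldl_append]; rfl
      have hcont : (PySem.Set.ofList p).contains x = decide (x ∈ p) := by
        by_cases hx : x ∈ p
        · simp [PySem.Set.contains, PySem.Set.mem_ofList, hx]
        · simp [PySem.Set.contains, PySem.Set.mem_ofList, hx]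
      have hstep :
          (if (PySem.Set.ofList p).contains x then
             (pvS t p, PySem.Dict.mk (pvC t (fun b => !b) p), PySem.Set.ofList p)
           else
             let seen := PySem.Set.add (PySem.Set.ofList p) x
             match stepsB t 0 x with
             | some c => (pvS t p, (PySem.Dict.mk (pvC t (fun b => !b) p)).insert x c, seen)
             | none => (pvS t p ++ [x], PySem.Dict.mk (pvC t (fun b => !b) p), seen))
          = (pvS t (p ++ [x]), PySem.Dict.mk (pvC t (fun b => !b) (p ++ [x])), PySem.Set.ofList (p ++ [x])) := by
        by_cases hx : x ∈ p
        · rw [hcont]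
          simp only [hx, decide_true, if_pos]
          rw [pvS_snoc, if_pos hx, pvC_snoc, if_pos hx]
          have : PySem.Set.ofList (p ++ [x]) = PySem.Set.ofList p := by
            rw [hset, PySem.Set.add, if_pos (by rw [hcont]; simp [hx])]
          rw [this]
        · rw [hcont]
          simp only [hx, decide_false, Bool.false_eq_true, if_false]
          rw [← hset]
          cases hs : stepsB t 0 x with
          | some c =>
              have hf : pvF t x = (false, c) := by unfold pvF; rw [loops_agree, hs]
              have hf1 : (pvF t x).1 = false := by rw [hf]
              have hf2 : (pvF t x).2 = c := by rw [hf]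
              simp only []
              rw [pvS_snoc, if_neg hx, if_neg (by simp [hf1]), ← hf2,
                insert_pvC_fresh t _ p x hx (by simp [hf1])]
          | none =>
              have hf : pvF t x = (true, max t 0) := by unfold pvF; rw [loops_agree, hs]
              have hf1 : (pvF t x).1 = true := by rw [hf]
              simp only []
              rw [pvS_snoc, if_neg hx, if_pos hf1, pvC_snoc, if_neg hx, if_neg (by simp [hf1])]
      rw [hstep]
      have h2 : p ++ x :: l = (p ++ [x]) ++ l := by simp
      rw [h2]
      exact ih (p ++ [x])

-- ---- insertBy helpers ----
theorem insertBy_head_true {α : Type} (p : α → α → Bool) (x : α) (B : List α)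
    (h : ∀ b ∈ B, p x b = true) : PySem.List.insertBy p x B = x :: B := by
  cases B with
  | nil => rfl
  | cons b B' => rw [PySem.List.insertBy]; simp [h b (by simp)]

theorem insertBy_append_false {α : Type} (p : α → α → Bool) (x : α) (A B : List α)
    (h : ∀ a ∈ A, p x a = false) :
    PySem.List.insertBy p x (A ++ B) = A ++ PySem.List.insertBy p x B := by
  induction A with
  | nil => rfl
  | cons a A' ih =>
      rw [List.cons_append, PySem.List.insertBy]
      have : p x a = false := h a (by simp)
      simp only [this, Bool.false_eq_true, if_false, List.cons_append]
      rw [ih (fun a ha => h a (by simp [ha]))]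

theorem sorted_snoc {α κ : Type} [LT κ] [DecidableLT κ] (L : List α) (x : α) (key : α → κ) :
    PySem.List.sorted (L ++ [x]) key =
      PySem.List.insertBy (fun a b => decide (key a < key b)) x (PySem.List.sorted L key) := by
  simp [PySem.List.sorted, List.foldl_append]

-- ---- stable sort by an Int key = concatenation of its key-groups in increasing key order ----
theorem sorted_eq_flatMap_filter {α : Type} (key : α → Int) (cs : List Int)
    (hcs : cs.Pairwise (· < ·)) :
    ∀ (L : List α), (∀ x ∈ L, key x ∈ cs) →
      PySem.List.sorted L key = cs.flatMap (fun c => L.filter (fun x => key x == c)) := by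
  intro L
  induction L using List.reverseRecOn with
  | nil => intro _; simp [PySem.List.sorted]
  | append_singleton L x ih =>
      intro hall
      have hx : key x ∈ cs := hall x (by simp)
      rcases List.append_of_mem hx with ⟨cs1, cs2, rfl⟩
      have hp := hcs
      rw [List.pairwise_append] at hp
      have h1 : ∀ c ∈ cs1, c < key x := fun c hc => hp.2.2 c hc (key x) (by simp)
      have h2 : ∀ c ∈ cs2, key x < c := (List.pairwise_cons.mp hp.2.1).1
      rw [sorted_snoc, ih (fun y hy => hall y (by simp [hy]))]
      rw [List.flatMap_append, List.flatMap_cons]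
      set pred := fun a b => decide (key a < key b) with hpred
      have hfalse : ∀ a ∈ cs1.flatMap (fun c => L.filter (fun y => key y == c)) ++
          L.filter (fun y => key y == key x), pred x a = false := by
        intro a ha
        rcases List.mem_append.mp ha with ha | ha
        · rcases List.mem_flatMap.mp ha with ⟨c, hc, hmem⟩
          have : key a = c := by simpa using (List.mem_filter.mp hmem).2
          have : key a < key x := this ▸ h1 c hc
          simp [hpred]; omega
        · have : key a = key x := by simpa using (List.mem_filter.mp ha).2
          simp [hpred]; omega
      have htrue : ∀ b ∈ cs2.flatMap (fun c => L.filter (fun y => key y == c)), pred x b = true := by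
        intro b hb
        rcases List.mem_flatMap.mp hb with ⟨c, hc, hmem⟩
        have : key b = c := by simpa using (List.mem_filter.mp hmem).2
        have : key x < key b := this ▸ h2 c hc
        simp [hpred]; omega
      rw [← List.append_assoc, insertBy_append_false pred x _ _ hfalse,
        insertBy_head_true pred x _ htrue]
      -- now rewrite the right-hand side groups of L ++ [x]
      have gr1 : ∀ c ∈ cs1, (L ++ [x]).filter (fun y => key y == c) = L.filter (fun y => key y == c) := by
        intro c hc
        rw [List.filter_append]
        have : key x ≠ c := by have := h1 c hc; omega
        simp [this]
      have gr2 : ∀ c ∈ cs2, (L ++ [x]).filter (fun y => key y == c) = L.filter (fun y => key y == c) := by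
        intro c hc
        rw [List.filter_append]
        have : key x ≠ c := by have := h2 c hc; omega
        simp [this]
      have grx : (L ++ [x]).filter (fun y => key y == key x) = L.filter (fun y => key y == key x) ++ [x] := by
        rw [List.filter_append]; simp
      rw [List.flatMap_append, List.flatMap_cons, grx]
      rw [show cs1.flatMap (fun c => (L ++ [x]).filter (fun y => key y == c))
            = cs1.flatMap (fun c => L.filter (fun y => key y == c)) from
          List.flatMap_congr (fun c hc => gr1 c hc),
        show cs2.flatMap (fun c => (L ++ [x]).filter (fun y => key y == c))
            = cs2.flatMap (fun c => L.filter (fun y => key y == c)) from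
          List.flatMap_congr (fun c hc => gr2 c hc)]
      simp

theorem pyRange_one_pairwise (a b : Int) : (PySem.List.pyRange a b).Pairwise (· < ·) := by
  generalize hk : (b - a).toNat = k
  induction k generalizing a with
  | zero =>
      have h : ¬ a < b := by omega
      have : PySem.List.pyRange a b = [] := by
        cases he : PySem.List.pyRange a b with
        | nil => rfl
        | cons y ys =>
            have : y ∈ PySem.List.pyRange a b := by rw [he]; simp
            have := PySem.List.mem_pyRange_one.mp this
            omega
      rw [this]; exact List.Pairwise.nil
  | succ k ih =>
      by_cases h : a < b
      · rw [PySem.List.pyRange_one_cons h]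
        refine List.Pairwise.cons ?_ (ih (a+1) (by omega))
        intro y hy
        have := PySem.List.mem_pyRange_one.mp hy
        omega
      · have : PySem.List.pyRange a b = [] := by
          cases he : PySem.List.pyRange a b with
          | nil => rfl
          | cons y ys =>
              have : y ∈ PySem.List.pyRange a b := by rw [he]; simp
              have := PySem.List.mem_pyRange_one.mp this
              omega
        rw [this]; exact List.Pairwise.nil

theorem sorted_map_key {α β : Type} (g : α → β) (keyα : α → Int) (keyβ : β → Int)
    (h : ∀ a, keyβ (g a) = keyα a) (L : List α) :
    PySem.List.sorted (L.map g) keyβ = (PySem.List.sorted L keyα).map g := by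
  induction L using List.reverseRecOn with
  | nil => rfl
  | append_singleton L x ih =>
      rw [List.map_append, List.map_singleton, sorted_snoc, sorted_snoc, ih]
      -- insertBy commutes with map when the keys agree
      generalize (PySem.List.sorted L keyα) = M
      induction M with
      | nil => rfl
      | cons m M' ihM =>
          rw [List.map_cons, PySem.List.insertBy, PySem.List.insertBy]
          rw [h x, h m]
          by_cases hpm : keyα x < keyα m
          · simp [hpm]
          · simp only [hpm, decide_false, Bool.false_eq_true, if_false, List.map_cons]
            rw [ihM]

theorem keys_ofList_of_nodup {ν : Type} (l : List (Int × ν)) (h : (l.map Prod.fst).Nodup) :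
    (PySem.Dict.ofList l).keys = l.map Prod.fst := by
  have hfresh : ∀ a ∈ l, (PySem.Dict.empty : PySem.Dict Int ν).contains a.1 = false := by
    intro a _; rfl
  have hitems := PySem.Dict.items_foldl_insert_fresh l Prod.fst Prod.snd PySem.Dict.empty hfresh h
  have : (PySem.Dict.ofList l).items = l := by
    show (List.foldl (fun acc p => acc.insert p.1 p.2) PySem.Dict.empty l).items = l
    rw [hitems]
    show [] ++ _ = l
    simp
  show (PySem.Dict.ofList l).items.map Prod.fst = l.map Prod.fst
  rw [this]

theorem nodup_fst_sorted_pvC (t : Int) (pr : Bool → Bool) (nums : List Int) :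
    ((PySem.List.sorted (pvC t pr nums) (fun item => item.2)).map Prod.fst).Nodup := by
  have hperm : (PySem.List.sorted (pvC t pr nums) (fun item => item.2)).Perm (pvC t pr nums) :=
    PySem.List.sorted_perm _ _ _
  refine ((hperm.map Prod.fst).nodup_iff).mpr ?_
  unfold pvC
  rw [List.map_map]
  have : (Prod.fst ∘ fun m => (m, (pvF t m).2)) = id := rfl
  rw [this, List.map_id]
  exact (PySem.Set.nodup_ofList nums).filter _

theorem keys_sorted_pvC (t : Int) (pr : Bool → Bool) (nums : List Int) :
    (PySem.Dict.ofList (PySem.List.sorted (pvC t pr nums) (fun item => item.2))).keys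
      = PySem.List.sorted ((PySem.List.dedup nums).filter (fun m => pr (pvF t m).1))
          (fun m => (pvF t m).2) := by
  rw [keys_ofList_of_nodup _ (nodup_fst_sorted_pvC t pr nums)]
  unfold pvC
  rw [sorted_map_key (fun m => (m, (pvF t m).2)) (fun m => (pvF t m).2) (fun item => item.2)
    (fun a => rfl), List.map_map]
  have : (Prod.fst ∘ fun m => (m, (pvF t m).2)) = id := rfl
  rw [this, List.map_id]

-- all-equal keys: pairwise ≤ trivially
theorem pairwise_le_of_const {α : Type} (key : α → Int) (k : Int) (L : List α)
    (h : ∀ x ∈ L, key x = k) : L.Pairwise (fun a b => key a ≤ key b) := by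
  induction L with
  | nil => exact List.Pairwise.nil
  | cons x L ih =>
      refine List.Pairwise.cons ?_ (ih (fun y hy => h y (by simp [hy])))
      intro y hy
      rw [h x (by simp), h y (by simp [hy])]

-- B's bucket dict: lookups are the per-count groups of the steps items.
theorem buckets_getD (items : List (Int × Int)) (c : Int) :
    (items.foldl (fun (b : PySem.Dict Int (List Int)) kv => b.modify kv.2 [] (· ++ [kv.1]))
      PySem.Dict.empty).getD c []
    = (items.filter (fun kv => kv.2 == c)).map (fun kv => kv.1) := by
  have h := PySem.Dict.getD_foldl_modify_append (items.map Prod.swap) PySem.Dict.empty c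
  rw [List.foldl_map] at h
  have h2 : (items.foldl (fun (b : PySem.Dict Int (List Int)) kv => b.modify kv.2 [] (· ++ [kv.1]))
      PySem.Dict.empty).getD c []
      = PySem.Dict.empty.getD c [] ++
        ((items.map Prod.swap).filter (fun p => p.1 == c)).map (fun p => p.2) := h
  rw [h2, PySem.Dict.getD_empty, List.filter_map, List.map_map]
  simp [Function.comp_def, Prod.swap]

-- B's bucket dict: its key list is the set of step counts.
theorem buckets_keys (items : List (Int × Int)) :
    (items.foldl (fun (b : PySem.Dict Int (List Int)) kv => b.modify kv.2 [] (· ++ [kv.1]))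
      PySem.Dict.empty).keys
    = PySem.Set.ofList (items.map (fun kv => kv.2)) := by
  have h : (items.foldl (fun (b : PySem.Dict Int (List Int)) kv => b.modify kv.2 [] (· ++ [kv.1]))
      PySem.Dict.empty).keys
      = PySem.Set.update (PySem.Dict.empty : PySem.Dict Int (List Int)).keys
          (items.map (fun kv => kv.2)) :=
    PySem.Dict.keys_foldl_modify_key items (fun kv => kv.2) [] (fun _ kv v => v ++ [kv.1])
      PySem.Dict.empty
  rw [h]
  exact PySem.Set.update_nil_left _

theorem main_eq (numbers : List Int) (t : Int) :
    lychrel_sort numbers t = lychrel_sort_alt numbers t := by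
  unfold lychrel_sort lychrel_sort_alt
  rw [show ((PySem.Dict.empty, PySem.Dict.empty) : PySem.Dict Int Int × PySem.Dict Int Int)
        = (PySem.Dict.mk (pvC t (fun b => b) []), PySem.Dict.mk (pvC t (fun b => !b) [])) from rfl,
      foldA t numbers [],
      show (([], PySem.Dict.empty, PySem.Set.ofList []) :
            List Int × PySem.Dict Int Int × PySem.Set Int)
        = (pvS t [], PySem.Dict.mk (pvC t (fun b => !b) []), PySem.Set.ofList []) from rfl,
      foldB t numbers []]
  simp only [List.nil_append]
  rw [keys_sorted_pvC t (fun b => !b) numbers, keys_sorted_pvC t (fun b => b) numbers]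
  -- suspect side: all step counts equal max t 0, so the stable sort is the identity
  have hsusp : PySem.List.sorted ((PySem.List.dedup numbers).filter (fun m => (pvF t m).1))
      (fun m => (pvF t m).2) = pvS t numbers := by
    unfold pvS
    apply PySem.List.sorted_eq_self_of_pairwise
    apply pairwise_le_of_const _ (max t 0)
    intro m hm
    exact pvF_true_snd t m (List.mem_filter.mp hm).2
  rw [hsusp]
  congr 1
  -- non-suspect side
  set N := (PySem.List.dedup numbers).filter (fun m => !(pvF t m).1) with hN
  show PySem.List.sorted N (fun m => (pvF t m).2) = _
  show PySem.List.sorted N (fun m => (pvF t m).2) =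
    (if (PySem.Dict.mk (pvC t (fun b => !b) numbers)).items.isEmpty then []
     else
       let top := (PySem.List.max? ((pvC t (fun b => !b) numbers).foldl
           (fun (b : PySem.Dict Int (List Int)) kv => b.modify kv.2 [] (· ++ [kv.1]))
           PySem.Dict.empty).keys (fun c => c)).getD 0
       (PySem.List.pyRange 1 (top + 1) 1).foldl
         (fun acc c => acc ++ ((pvC t (fun b => !b) numbers).foldl
             (fun (b : PySem.Dict Int (List Int)) kv => b.modify kv.2 [] (· ++ [kv.1]))
             PySem.Dict.empty).getD c []) [])
  have hitems : pvC t (fun b => !b) numbers = N.map (fun m => (m, (pvF t m).2)) := rfl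
  by_cases hemp : pvC t (fun b => !b) numbers = []
  · have hNnil : N = [] := by
      rw [hitems] at hemp
      exact List.map_eq_nil_iff.mp hemp
    rw [show (PySem.Dict.mk (pvC t (fun b => !b) numbers)).items = pvC t (fun b => !b) numbers from rfl]
    rw [if_pos (by rw [hemp]; rfl), hNnil]
    rfl
  · rw [show (PySem.Dict.mk (pvC t (fun b => !b) numbers)).items = pvC t (fun b => !b) numbers from rfl]
    rw [if_neg (by rw [List.isEmpty_iff]; exact hemp)]
    rw [buckets_keys]
    set vals := (pvC t (fun b => !b) numbers).map (fun kv => kv.2) with hvals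
    have hvne : vals ≠ [] := by
      intro hv
      exact hemp (List.map_eq_nil_iff.mp hv)
    have hsetne : PySem.Set.ofList vals ≠ [] := by
      intro hv
      rcases List.exists_mem_of_ne_nil vals hvne with ⟨v, hvmem⟩
      have : v ∈ PySem.Set.ofList vals := (PySem.Set.mem_ofList vals v).mpr hvmem
      rw [hv] at this
      exact List.not_mem_nil this
    obtain ⟨m, hm⟩ : ∃ m, PySem.List.max? (PySem.Set.ofList vals) (fun c => c) = some m := by
      cases hmax : PySem.List.max? (PySem.Set.ofList vals) (fun c => c) with
      | none => exact absurd ((PySem.List.max?_eq_none_iff _ _).mp hmax) hsetne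
      | some m => exact ⟨m, rfl⟩
    rw [hm]
    show _ = (PySem.List.pyRange 1 (m + 1) 1).foldl (fun acc c => acc ++ _) []
    have hmax : ∀ v ∈ vals, v ≤ m := by
      intro v hv
      exact PySem.List.max?_isMax hm v ((PySem.Set.mem_ofList vals v).mpr hv)
    have hfold : (PySem.List.pyRange 1 (m + 1) 1).foldl
        (fun acc c => acc ++ ((pvC t (fun b => !b) numbers).foldl
            (fun (b : PySem.Dict Int (List Int)) kv => b.modify kv.2 [] (· ++ [kv.1]))
            PySem.Dict.empty).getD c []) []
        = (PySem.List.pyRange 1 (m + 1) 1).flatMap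
            (fun c => N.filter (fun x => (pvF t x).2 == c)) := by
      rw [PySem.List.foldl_append_eq_flatMap, List.nil_append]
      apply List.flatMap_congr
      intro c _
      rw [buckets_getD, hitems, List.filter_map, List.map_map]
      simp [Function.comp_def]
    rw [hfold]
    apply sorted_eq_flatMap_filter (fun m => (pvF t m).2) _ (pyRange_one_pairwise 1 (m+1))
    intro x hx
    rw [PySem.List.mem_pyRange_one]
    constructor
    · have hx1 : (pvF t x).1 = false := by
        have := (List.mem_filter.mp (hN ▸ hx)).2
        simpa using this
      exact pvF_false_pos t x hx1
    · have hvmem : (pvF t x).2 ∈ vals := by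
        rw [hvals, hitems, List.map_map]
        exact List.mem_map.mpr ⟨x, hx, rfl⟩
      have := hmax _ hvmem
      omega

-- ===== VERDICT (by name: the statement is the Claim_ definition above) =====
theorem lychrel_sort_spec : Claim_equal_lychrel_sort := by
  intro numbers t _ _
  show lychrel_sort numbers t = lychrel_sort_alt numbers t
  exact main_eq numbers t
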